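-- pv_equiv track=rewrite | github.com/kingdavid425/meta-careers-puzzles | Level1/ScoreboardInference.py | getMinProblemCount
-- ===== SOURCE A (Python) =====
-- from typing import List
--
-- def getMinProblemCount(N: int, S: List[int]) -> int:
--   # Write your code here
--   ones = 0
--   twos = 0
--
--   S = set(S)
--   for Si in S:
--     if Si // 2 > twos:
--       twos = Si // 2
--
--     if Si % 2 > ones:
--       ones = Si % 2
--
--   return twos + ones
-- ===== SOURCE B (Python) =====
-- from typing import List
--
-- def getMinProblemCount(N: int, S: List[int]) -> int:
--   # Sort once, then read both facts off the sorted order: the largest score is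
--   # the last element (its floor-half, clamped at 0, is the 2-point count), and
--   # a descending early-exit scan finds whether any score is odd (1-point flag).
--   T = sorted(S)
--   if not T:
--     return 0
--   base = T[-1] // 2
--   if base < 0:
--     base = 0
--   for s in reversed(T):
--     if s % 2 != 0:
--       return base + 1
--   return base
-- ===== Notes on version B (the rewrite author's own statement) =====
-- stated objective: alternative
-- what changed: Sort-then-scan instead of a one-pass set fold with two running-max accumulators: B sorts S once, takes the 2-point count from the last (largest) sorted element, and finds the odd-score flag by an early-exit descending scan.
import Mathlib
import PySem

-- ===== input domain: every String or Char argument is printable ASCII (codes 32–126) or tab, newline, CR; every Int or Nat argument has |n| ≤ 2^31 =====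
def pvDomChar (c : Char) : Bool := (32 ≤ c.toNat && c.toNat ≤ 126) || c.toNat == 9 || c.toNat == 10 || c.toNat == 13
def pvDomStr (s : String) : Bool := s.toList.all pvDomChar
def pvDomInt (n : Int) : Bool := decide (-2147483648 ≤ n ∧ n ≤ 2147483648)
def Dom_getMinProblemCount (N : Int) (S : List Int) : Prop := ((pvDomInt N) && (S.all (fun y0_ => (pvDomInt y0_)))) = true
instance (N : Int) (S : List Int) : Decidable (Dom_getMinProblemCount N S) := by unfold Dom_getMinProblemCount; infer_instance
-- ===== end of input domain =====

-- B replaces A's one-pass set fold with two running-max accumulators by a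
-- sort-then-scan: sort S once, read the 2-point count off the last (largest)
-- sorted element, and find the odd-score flag by an early-exit descending scan
-- (objective: alternative).

-- ===== PORT A =====
-- for Si in set(S): running maxes of Si//2 and Si%2; return their sum
def getMinProblemCount (N : Int) (S : List Int) : Int :=
  let s : PySem.Set Int := PySem.Set.ofList S
  let p : Int × Int := s.foldl
    (fun (st : Int × Int) Si =>
      let twos := if PySem.Int.floordiv Si 2 > st.2 then PySem.Int.floordiv Si 2 else st.2
      let ones := if PySem.Int.mod Si 2 > st.1 then PySem.Int.mod Si 2 else st.1
      (ones, twos)) (0, 0)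
  p.2 + p.1

-- ===== PORT B =====
-- 'for s in reversed(T): if s % 2 != 0: return base + 1' — early-exit scan for an odd score
def pvAltOddScan : List Int → Bool
  | [] => false
  | s :: rest => if PySem.Int.mod s 2 ≠ 0 then true else pvAltOddScan rest

-- T = sorted(S); if not T: return 0; base = max(0, T[-1]//2) written with the
-- explicit clamp; then the reversed early-exit scan decides between base+1 and base.
-- ('if not T: return 0' and 'T[-1]' are ported together: pyGet? T (-1) is none iff T = [])
def getMinProblemCount_alt (N : Int) (S : List Int) : Int :=
  let T := PySem.List.sorted S (fun x => x) false
  match PySem.List.pyGet? T (-1) with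
  | none => 0
  | some last =>
      let base0 := PySem.Int.floordiv last 2
      let base := if base0 < 0 then 0 else base0
      if pvAltOddScan T.reverse then base + 1 else base

-- ===== PRECONDITION & SPEC =====
def Spec_getMinProblemCount (N : Int) (S : List Int) (out : Int) : Prop := out = getMinProblemCount_alt N S
instance (N : Int) (S : List Int) (out : Int) : Decidable (Spec_getMinProblemCount N S out) := by unfold Spec_getMinProblemCount; infer_instance

-- ===== CLAIM (what is proved, stated in full; the proofs are below) =====
def Claim_equal_getMinProblemCount : Prop := ∀ (N : Int) (S : List Int), Dom_getMinProblemCount N S → Spec_getMinProblemCount N S (getMinProblemCount N S)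

-- ===== LEMMAS AND PROOFS =====

-- A's two conditional updates are running maxes of the two projections
theorem pv_fold_is_max (f g : Int → Int) (L : List Int) (o t : Int) :
    L.foldl (fun (st : Int × Int) Si =>
      let twos := if g Si > st.2 then g Si else st.2
      let ones := if f Si > st.1 then f Si else st.1
      (ones, twos)) (o, t)
    = ((L.map f).foldl max o, (L.map g).foldl max t) := by
  induction L generalizing o t with
  | nil => rfl
  | cons x xs ih =>
      simp only [List.foldl, List.map]
      rw [ih]
      congr 1 <;> rcases le_or_gt (f x) o with h | h <;> rcases le_or_gt (g x) t with h2 | h2 <;>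
        simp [not_lt.mpr, le_of_lt, *]

-- upper bound for a foldl-max of a projection
theorem pv_foldl_max_le (f : Int → Int) (L : List Int) (a b : Int)
    (ha : a ≤ b) (h : ∀ y ∈ L, f y ≤ b) : (L.map f).foldl max a ≤ b := by
  rcases PySem.List.foldl_max_mem (L.map f) a with h1 | h1
  · rw [h1]; exact ha
  · obtain ⟨y, hy, hfy⟩ := List.mem_map.mp h1
    rw [← hfy]; exact h y hy

-- a foldl-max of a projection depends only on membership
theorem pv_foldl_max_mem_eq (f : Int → Int) (L1 L2 : List Int) (a : Int)
    (h : ∀ y, y ∈ L1 ↔ y ∈ L2) :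
    (L1.map f).foldl max a = (L2.map f).foldl max a := by
  apply le_antisymm
  · exact pv_foldl_max_le f L1 a _ (PySem.List.le_foldl_max _ _).1
      (fun y hy => (PySem.List.le_foldl_max _ _).2 (f y) (List.mem_map_of_mem ((h y).mp hy)))
  · exact pv_foldl_max_le f L2 a _ (PySem.List.le_foldl_max _ _).1
      (fun y hy => (PySem.List.le_foldl_max _ _).2 (f y) (List.mem_map_of_mem ((h y).mpr hy)))

-- the last element of a ≤-pairwise (ascending) list bounds every element
theorem pv_getLast_is_max (L : List Int) (hL : L ≠ []) (hp : L.Pairwise (· ≤ ·)) :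
    ∀ y ∈ L, y ≤ L.getLast hL := by
  induction L with
  | nil => cases hL rfl
  | cons x t ih =>
      intro y hy
      rcases List.pairwise_cons.mp hp with ⟨hx, ht⟩
      cases t with
      | nil => simp at hy; simp [hy]
      | cons a b =>
          rw [List.getLast_cons (by simp)]
          rcases List.mem_cons.mp hy with rfl | hy
          · exact le_trans (hx _ List.mem_cons_self)
              (ih (by simp) ht _ List.mem_cons_self)
          · exact ih (by simp) ht _ hy

-- the early-exit scan is an existence test for an odd element
theorem pv_oddScan_any (L : List Int) :
    pvAltOddScan L = L.any (fun s => PySem.Int.mod s 2 != 0) := by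
  induction L with
  | nil => rfl
  | cons x t ih =>
      simp only [pvAltOddScan, PySem.Int.mod, ih]
      by_cases h : x.fmod 2 = 0 <;> simp [h, bne]

theorem getMinProblemCount_spec : Claim_equal_getMinProblemCount := by
  intro N S _
  unfold Spec_getMinProblemCount getMinProblemCount getMinProblemCount_alt
  simp only
  rw [pv_fold_is_max]
  have hmem : ∀ y, y ∈ PySem.Set.ofList S ↔ y ∈ S := fun y => PySem.Set.mem_ofList S y
  rw [pv_foldl_max_mem_eq _ _ S _ hmem, pv_foldl_max_mem_eq _ _ S _ hmem]
  set T := PySem.List.sorted S (fun x => x) false with hT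
  have hperm : T.Perm S := PySem.List.sorted_perm S (fun x => x) false
  cases S with
  | nil =>
      have : T = [] := by rw [hT]; rfl
      simp [this, PySem.List.pyGet?_neg_one]
  | cons x t =>
      have hTne : T ≠ [] := by
        intro h; exact (List.cons_ne_nil x t) (List.Perm.nil_eq (h ▸ hperm)).symm
      have hlast : PySem.List.pyGet? T (-1) = some (T.getLast hTne) := by
        rw [PySem.List.pyGet?_neg_one, List.getLast?_eq_getLast_of_ne_nil hTne]
      rw [hlast]
      set m := t.foldl max x with hm
      have hmS : m ∈ x :: t := by
        rcases PySem.List.foldl_max_mem t x with h1 | h1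
        · rw [hm, h1]; exact List.mem_cons_self
        · exact List.mem_cons_of_mem x h1
      have hmax : ∀ y ∈ x :: t, y ≤ m := by
        intro y hy
        rcases List.mem_cons.mp hy with rfl | hy
        · exact (PySem.List.le_foldl_max t y).1
        · exact (PySem.List.le_foldl_max t x).2 y hy
      -- the last element of T is exactly m
      have hlastm : T.getLast hTne = m := by
        apply le_antisymm
        · exact hmax _ ((hperm.mem_iff).mp (List.getLast_mem hTne))
        · exact pv_getLast_is_max T hTne (PySem.List.sorted_pairwise (x :: t) (fun y => y)) m
            ((hperm.mem_iff).mpr hmS)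
      rw [hlastm]
      -- the twos accumulator is max 0 (m // 2)
      have htwos : (((x :: t)).map (fun Si => PySem.Int.floordiv Si 2)).foldl max 0
          = max 0 (PySem.Int.floordiv m 2) := by
        apply le_antisymm
        · apply pv_foldl_max_le _ _ _ _ (le_max_left _ _)
          intro y hy
          refine le_trans ?_ (le_max_right 0 _)
          rw [PySem.Int.floordiv_eq_ediv_of_pos (by norm_num),
              PySem.Int.floordiv_eq_ediv_of_pos (by norm_num)]
          exact Int.ediv_le_ediv (by norm_num) (hmax y hy)
        · apply max_le
          · exact (PySem.List.le_foldl_max _ _).1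
          · exact (PySem.List.le_foldl_max _ _).2 _ (List.mem_map_of_mem hmS)
      have hmodmem : ∀ y : Int, PySem.Int.mod y 2 = 0 ∨ PySem.Int.mod y 2 = 1 := by
        intro y
        have h1 := PySem.Int.mod_nonneg y (b := 2) (by norm_num)
        have h2 := PySem.Int.mod_lt y (b := 2) (by norm_num)
        omega
      -- the ones accumulator is B's reversed early-exit scan over T
      have hones : (((x :: t)).map (fun Si => PySem.Int.mod Si 2)).foldl max 0
          = if pvAltOddScan T.reverse then 1 else 0 := by
        rw [pv_oddScan_any, List.any_reverse]
        by_cases hodd : ∃ y ∈ x :: t, PySem.Int.mod y 2 ≠ 0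
        · obtain ⟨y, hy, hy2⟩ := hodd
          have hcond : T.any (fun s => PySem.Int.mod s 2 != 0) = true := by
            simp only [List.any_eq_true, bne_iff_ne]
            exact ⟨y, (hperm.mem_iff).mpr hy, hy2⟩
          rw [hcond, if_pos rfl]
          apply le_antisymm
          · apply pv_foldl_max_le _ _ _ _ (by norm_num)
            intro z _; rcases hmodmem z with h | h <;> omega
          · have hy1 : PySem.Int.mod y 2 = 1 := by rcases hmodmem y with h | h <;> omega
            have := (PySem.List.le_foldl_max ((x :: t).map (fun Si => PySem.Int.mod Si 2)) 0).2
              _ (List.mem_map_of_mem hy)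
            omega
        · push_neg at hodd
          have hcond : T.any (fun s => PySem.Int.mod s 2 != 0) = false := by
            simp only [List.any_eq_false, bne_iff_ne, ne_eq, not_not]
            exact fun y hy => hodd y ((hperm.mem_iff).mp hy)
          rw [hcond, if_neg (by simp)]
          apply le_antisymm
          · apply pv_foldl_max_le _ _ _ _ (le_refl 0)
            intro z hz; rw [hodd z hz]
          · exact (PySem.List.le_foldl_max _ _).1
      rw [htwos, hones]
      -- (if base0 < 0 then 0 else base0) = max 0 base0; commute the sum
      have hfd : PySem.Int.floordiv m 2 = m / 2 := PySem.Int.floordiv_eq_ediv_of_pos (by norm_num)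
      rw [hfd]
      by_cases hs : pvAltOddScan T.reverse = true <;> by_cases h : m / 2 < 0 <;>
        simp [hs, h, max_def]
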